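-- pv_equiv track=rewrite | github.com/smartinsert/CodingProblem | amazon/substrings_of_size_k_with_k_distinct_characters.py | substrings_with_k_distinct_characters_of_size_k
-- ===== SOURCE A (Python) =====
-- from typing import Set
--
-- def substrings_with_k_distinct_characters_of_size_k(sequence: str, k: int) -> Set[str]:
--     result = set()
--     window_start = 0
--     char_to_frequency = {}
--     for window_end in range(len(sequence)):
--         right_char = sequence[window_end]
--         if right_char in char_to_frequency:
--             window_start = max(window_start, char_to_frequency[right_char] + 1)
--         char_to_frequency[right_char] = window_end
--         if window_end - window_start + 1 == k:
--             result.add(sequence[window_start: window_end + 1])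
--             window_start += 1
--     return result
-- ===== SOURCE B (Python) =====
-- def substrings_with_k_distinct_characters_of_size_k(sequence: str, k: int):
--     result = set()
--     if k >= 1:
--         for i in range(len(sequence) - k + 1):
--             window = sequence[i:i + k]
--             if len(set(window)) == k:
--                 result.add(window)
--     return result
-- ===== Notes on version B (the rewrite author's own statement) =====
-- stated objective: simpler
-- what changed: Replaces the sliding-window state machine (running window_start plus a last-occurrence dict carried across iterations) by an independent per-window test: each length-k slice is added iff it has k distinct characters; nothing is maintained across iterations.
import Mathlib
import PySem

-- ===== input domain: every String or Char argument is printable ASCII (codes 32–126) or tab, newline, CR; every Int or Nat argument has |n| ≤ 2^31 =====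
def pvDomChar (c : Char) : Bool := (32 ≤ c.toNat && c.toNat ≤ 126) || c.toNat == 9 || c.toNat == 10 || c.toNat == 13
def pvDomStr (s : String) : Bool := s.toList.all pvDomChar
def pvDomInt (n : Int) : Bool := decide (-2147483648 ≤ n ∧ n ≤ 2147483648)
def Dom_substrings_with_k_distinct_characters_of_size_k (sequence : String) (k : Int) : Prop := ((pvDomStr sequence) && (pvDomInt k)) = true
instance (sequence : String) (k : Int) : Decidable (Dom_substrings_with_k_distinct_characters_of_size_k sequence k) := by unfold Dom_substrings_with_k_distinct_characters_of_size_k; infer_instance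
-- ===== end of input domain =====

-- B replaces A's sliding-window state machine by an independent per-window distinctness test (simpler; same results).


-- ===== PORT A =====
-- one iteration of A's loop body; state = (result, window_start, char_to_frequency)
def pvStepA (cs : List Char) (k : Int)
    (st : PySem.Set String × Int × PySem.Dict Char Int) (windowEnd : Int) :
    PySem.Set String × Int × PySem.Dict Char Int :=
  let rightChar := PySem.List.pyGetD cs windowEnd ' '
  let ws := if st.2.2.contains rightChar then max st.2.1 (st.2.2.getD rightChar 0 + 1) else st.2.1
  let d := st.2.2.insert rightChar windowEnd
  if windowEnd - ws + 1 = k then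
    (PySem.Set.add st.1 (String.ofList (PySem.List.slice cs (some ws) (some (windowEnd + 1)))),
     ws + 1, d)
  else
    (st.1, ws, d)

def substrings_with_k_distinct_characters_of_size_k (sequence : String) (k : Int) : List String :=
  ((PySem.List.pyRange 0 (sequence.toList.length : Int) 1).foldl
      (pvStepA sequence.toList k) (PySem.Set.empty, (0 : Int), PySem.Dict.empty)).1

-- ===== PORT B =====
-- one iteration of B's loop body: add the window iff it has k distinct characters
def pvStepB (cs : List Char) (k : Int) (result : PySem.Set String) (i : Int) : PySem.Set String :=
  let window := PySem.List.slice cs (some i) (some (i + k))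
  if ((PySem.Set.ofList window).length : Int) = k then
    PySem.Set.add result (String.ofList window)
  else result

def substrings_with_k_distinct_characters_of_size_k_alt (sequence : String) (k : Int) : List String :=
  if 1 ≤ k then
    (PySem.List.pyRange 0 ((sequence.toList.length : Int) - k + 1) 1).foldl
      (pvStepB sequence.toList k) PySem.Set.empty
  else PySem.Set.empty

-- ===== PRECONDITION & SPEC =====
def Spec_substrings_with_k_distinct_characters_of_size_k (sequence : String) (k : Int) (out : List String) : Prop := out = substrings_with_k_distinct_characters_of_size_k_alt sequence k
instance (sequence : String) (k : Int) (out : List String) : Decidable (Spec_substrings_with_k_distinct_characters_of_size_k sequence k out) := by unfold Spec_substrings_with_k_distinct_characters_of_size_k; infer_instance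

-- ===== CLAIM (what is proved, stated in full; the proofs are below) =====
def Claim_equal_substrings_with_k_distinct_characters_of_size_k : Prop := ∀ (sequence : String) (k : Int), Dom_substrings_with_k_distinct_characters_of_size_k sequence k → Spec_substrings_with_k_distinct_characters_of_size_k sequence k (substrings_with_k_distinct_characters_of_size_k sequence k)

-- ===== LEMMAS AND PROOFS =====

-- last index p < e with cs[p] = c (what A's dict stores after e iterations)
def pvLastIdx (cs : List Char) (c : Char) : Nat → Option Nat
  | 0 => none
  | e+1 => if cs.getD e ' ' = c then some e else pvLastIdx cs c e

-- smallest start s such that cs[s:e] has pairwise-distinct characters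
def pvSMin (cs : List Char) : Nat → Nat
  | 0 => 0
  | e+1 =>
    match pvLastIdx cs (cs.getD e ' ') e with
    | none => pvSMin cs e
    | some p => max (pvSMin cs e) (p + 1)

theorem pvLastIdx_lt (cs : List Char) (c : Char) (e p : Nat)
    (h : pvLastIdx cs c e = some p) : p < e := by
  induction e with
  | zero => simp [pvLastIdx] at h
  | succ n ih =>
    unfold pvLastIdx at h
    split at h
    · cases h; omega
    · exact Nat.lt_succ_of_lt (ih h)

theorem pvSMin_le (cs : List Char) (e : Nat) : pvSMin cs e ≤ e := by
  induction e with
  | zero => simp [pvSMin]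
  | succ n ih =>
    unfold pvSMin
    split
    · omega
    · rename_i p hp
      have := pvLastIdx_lt cs (cs.getD n ' ') n p hp
      omega

theorem pv_window_split (cs : List Char) (i e : Nat) (hi : i ≤ e) (he : e < cs.length) :
    (cs.drop i).take (e + 1 - i) = (cs.drop i).take (e - i) ++ [cs.getD e ' '] := by
  have h1 : e + 1 - i = (e - i) + 1 := by omega
  rw [h1, List.take_add_one, List.getElem?_drop]
  have h2 : i + (e - i) = e := by omega
  rw [h2, List.getElem?_eq_getElem he]
  simp [List.getD_eq_getElem?_getD, List.getElem?_eq_getElem he]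

theorem pvSMin_succ_none (cs : List Char) (e : Nat)
    (hL : pvLastIdx cs (cs.getD e ' ') e = none) : pvSMin cs (e+1) = pvSMin cs e := by
  simp only [pvSMin, hL]

theorem pvSMin_succ_some (cs : List Char) (e p : Nat)
    (hL : pvLastIdx cs (cs.getD e ' ') e = some p) :
    pvSMin cs (e+1) = max (pvSMin cs e) (p + 1) := by
  simp only [pvSMin, hL]

theorem pv_mem_window_iff (cs : List Char) (c : Char) (e : Nat) (he : e ≤ cs.length) (i : Nat) :
    c ∈ (cs.drop i).take (e - i) ↔ ∃ p, pvLastIdx cs c e = some p ∧ i ≤ p := by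
  induction e with
  | zero => simp [pvLastIdx]
  | succ e ih =>
    have he' : e ≤ cs.length := Nat.le_of_succ_le he
    by_cases hi : i ≤ e
    · rw [pv_window_split cs i e hi (by omega)]
      simp only [List.mem_append, List.mem_singleton]
      unfold pvLastIdx
      by_cases hc : cs.getD e ' ' = c
      · rw [if_pos hc]
        constructor
        · intro _; exact ⟨e, rfl, hi⟩
        · intro _; right; exact hc.symm
      · rw [if_neg hc]
        constructor
        · intro h
          rcases h with h | h
          · exact (ih he').1 h
          · exact absurd h.symm hc
        · intro h
          left
          exact (ih he').2 h
    · have h0 : e + 1 - i = 0 := by omega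
      simp only [h0, List.take_zero, List.not_mem_nil, false_iff]
      rintro ⟨p, hp, hip⟩
      have := pvLastIdx_lt cs c (e+1) p hp
      omega

theorem pv_nodup_iff (cs : List Char) (e : Nat) (he : e ≤ cs.length) (i : Nat) :
    ((cs.drop i).take (e - i)).Nodup ↔ pvSMin cs e ≤ i := by
  induction e with
  | zero => simp [pvSMin]
  | succ e ih =>
    have he' : e ≤ cs.length := Nat.le_of_succ_le he
    by_cases hi : i ≤ e
    · rw [pv_window_split cs i e hi (by omega)]
      have hnodup : ((cs.drop i).take (e - i) ++ [cs.getD e ' ']).Nodup ↔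
          ((cs.drop i).take (e - i)).Nodup ∧ cs.getD e ' ' ∉ (cs.drop i).take (e - i) := by
        simp only [List.nodup_append, List.nodup_singleton, true_and]
        constructor
        · rintro ⟨h1, h2⟩
          exact ⟨h1, fun hmem => (h2 _ hmem _ (List.mem_singleton_self _)) rfl⟩
        · rintro ⟨h1, h2⟩
          refine ⟨h1, ?_⟩
          intro a ha b hb
          rw [List.mem_singleton] at hb
          subst hb
          intro hab
          exact h2 (hab ▸ ha)
      rw [hnodup, ih he', pv_mem_window_iff cs _ e he' i]
      cases hL : pvLastIdx cs (cs.getD e ' ') e with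
      | none =>
        rw [pvSMin_succ_none cs e hL]
        simp
      | some p =>
        rw [pvSMin_succ_some cs e p hL]
        have hpe := pvLastIdx_lt cs (cs.getD e ' ') e p hL
        constructor
        · rintro ⟨h1, h2⟩
          have : ¬ i ≤ p := fun h => h2 ⟨p, rfl, h⟩
          omega
        · intro h
          refine ⟨by omega, ?_⟩
          rintro ⟨q, hq, hiq⟩
          cases hq
          omega
    · have h0 : e + 1 - i = 0 := by omega
      have := pvSMin_le cs (e+1)
      simp only [h0, List.take_zero, List.nodup_nil, true_iff]
      omega

theorem pv_len_ofList_lt (w : List Char) (h : ¬ w.Nodup) :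
    (PySem.Set.ofList w).length < w.length := by
  induction w using List.reverseRecOn with
  | nil => simp at h
  | append_singleton l x ih =>
    rw [PySem.Set.ofList_append_singleton]
    by_cases hx : x ∈ l
    · rw [PySem.Set.add_of_mem (by simpa [PySem.Set.mem_ofList] using hx)]
      have := PySem.Set.length_ofList_le l
      simp only [List.length_append, List.length_singleton]
      omega
    · have hni : ¬ l.Nodup := by
        intro hn
        apply h
        have hdisj : ∀ a ∈ l, ∀ b ∈ [x], a ≠ b := by
          intro a ha b hb
          rw [List.mem_singleton] at hb
          subst hb
          intro hab
          exact hx (hab ▸ ha)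
        exact List.nodup_append.mpr ⟨hn, List.nodup_singleton x, hdisj⟩
      rw [PySem.Set.add_of_not_mem (by simpa [PySem.Set.mem_ofList] using hx)]
      have := ih hni
      simp only [List.length_append, List.length_singleton]
      omega

-- closed form of one A-step on an explicit state triple
theorem pvStepA_closed (cs : List Char) (k : Int) (R : PySem.Set String) (W : Int)
    (d : PySem.Dict Char Int) (j : Int) (c : Char) (ws : Int)
    (hcv : PySem.List.pyGetD cs j ' ' = c)
    (hwsv : (if d.contains c then max W (d.getD c 0 + 1) else W) = ws) :
    pvStepA cs k (R, W, d) j =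
      (if j - ws + 1 = k then
        (PySem.Set.add R (String.ofList (PySem.List.slice cs (some ws) (some (j + 1)))),
         ws + 1, d.insert c j)
      else (R, ws, d.insert c j)) := by
  subst hcv hwsv
  rfl

-- closed form of one B-step given the window value
theorem pvStepB_closed (cs : List Char) (k : Int) (R : PySem.Set String) (i : Int)
    (w : List Char) (hw : PySem.List.slice cs (some i) (some (i + k)) = w) :
    pvStepB cs k R i =
      (if ((PySem.Set.ofList w).length : Int) = k then PySem.Set.add R (String.ofList w)
       else R) := by
  subst hw
  rfl

-- what A's dict lookups mean under the invariant
theorem pv_dict_contains (cs : List Char) (e : Nat) (d : PySem.Dict Char Int)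
    (hd : ∀ c, d.get? c = (pvLastIdx cs c e).map (fun p => (p : Int))) (c : Char) :
    d.contains c = (pvLastIdx cs c e).isSome := by
  rw [PySem.Dict.contains_eq_isSome_get?, hd c]
  cases pvLastIdx cs c e <;> simp

theorem pv_dict_getD (cs : List Char) (e : Nat) (d : PySem.Dict Char Int)
    (hd : ∀ c, d.get? c = (pvLastIdx cs c e).map (fun p => (p : Int)))
    (c : Char) (p : Nat) (hL : pvLastIdx cs c e = some p) :
    d.getD c 0 = (p : Int) := by
  rw [PySem.Dict.getD_eq_get?_getD, hd c, hL]
  rfl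

-- inserting this iteration's character updates the dict invariant
theorem pv_dict_step (cs : List Char) (e : Nat) (d : PySem.Dict Char Int)
    (hd : ∀ c, d.get? c = (pvLastIdx cs c e).map (fun p => (p : Int))) :
    ∀ c', (d.insert (cs.getD e ' ') ((e : Nat) : Int)).get? c'
      = (pvLastIdx cs c' (e+1)).map (fun p => (p : Int)) := by
  intro c'
  rw [PySem.Dict.get?_insert]
  unfold pvLastIdx
  by_cases h : c' = cs.getD e ' '
  · rw [if_pos h, if_pos h.symm]
    simp
  · rw [if_neg h, if_neg (fun hh => h hh.symm), hd c']

-- window length: the slice [i, i+K) inside the list has exactly K characters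
theorem pv_window_len (cs : List Char) (i K : Nat) (h : i + K ≤ cs.length) :
    ((cs.drop i).take K).length = K := by
  simp only [List.length_take, List.length_drop]
  omega

-- main invariant of A's loop, k ≥ 1 case
theorem pv_loopA_inv (cs : List Char) (K : Nat) (hK : 1 ≤ K) (e : Nat) (he : e ≤ cs.length) :
    ∃ d : PySem.Dict Char Int,
      (PySem.List.pyRange 0 (e : Int) 1).foldl (pvStepA cs (K : Int))
          (PySem.Set.empty, (0 : Int), PySem.Dict.empty)
        = ((PySem.List.pyRange 0 ((e : Int) - K + 1) 1).foldl (pvStepB cs (K : Int)) PySem.Set.empty,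
           max ((pvSMin cs e : Int)) ((e : Int) - K + 1), d)
      ∧ ∀ c, d.get? c = (pvLastIdx cs c e).map (fun p => (p : Int)) := by
  induction e with
  | zero =>
    refine ⟨PySem.Dict.empty, ?_, ?_⟩
    · rw [PySem.List.pyRange_one_eq_nil (by omega),
        PySem.List.pyRange_one_eq_nil (by push_cast; omega)]
      simp only [List.foldl_nil]
      have hmax : max ((pvSMin cs 0 : Int)) (((0:Nat) : Int) - K + 1) = 0 := by
        simp only [pvSMin]
        push_cast
        omega
      rw [hmax]
    · intro c
      simp [pvLastIdx, PySem.Dict.get?_empty]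
  | succ e ih =>
    obtain ⟨d, hfold, hd⟩ := ih (by omega)
    have hcast : ((e+1 : Nat) : Int) = (e : Int) + 1 := by push_cast; ring
    have hsplit : PySem.List.pyRange 0 ((e+1 : Nat) : Int) 1
        = PySem.List.pyRange 0 (e : Int) 1 ++ [(e : Int)] := by
      rw [hcast]
      exact PySem.List.pyRange_one_succ_right (by omega)
    rw [hsplit, List.foldl_append, hfold, List.foldl_cons, List.foldl_nil]
    refine ⟨d.insert (cs.getD e ' ') ((e : Nat) : Int), ?_, pv_dict_step cs e d hd⟩
    have hwsv : (if d.contains (cs.getD e ' ')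
          then max (max ((pvSMin cs e : Int)) ((e : Int) - K + 1))
                   (d.getD (cs.getD e ' ') 0 + 1)
          else max ((pvSMin cs e : Int)) ((e : Int) - K + 1))
        = max ((pvSMin cs (e+1) : Int)) ((e : Int) - K + 1) := by
      rw [pv_dict_contains cs e d hd]
      cases hL : pvLastIdx cs (cs.getD e ' ') e with
      | none =>
        rw [pvSMin_succ_none cs e hL]
        simp
      | some p =>
        rw [pv_dict_getD cs e d hd _ p hL, pvSMin_succ_some cs e p hL]
        simp only [Option.isSome_some, if_true]
        push_cast
        omega
    rw [pvStepA_closed cs (K : Int) _ _ d ((e : Nat) : Int) (cs.getD e ' ')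
      (max ((pvSMin cs (e+1) : Int)) ((e : Int) - K + 1))
      (by simp) hwsv]
    have hs0 : (0 : Int) ≤ ((pvSMin cs (e+1) : Nat) : Int) := Int.natCast_nonneg _
    by_cases hcond : ((pvSMin cs (e+1) : Nat) : Int) ≤ (e : Int) - K + 1
    · -- the window [e+1-K, e+1) is distinct: both sides add it
      have hKe : K ≤ e + 1 := by omega
      have hi : ((e + 1 - K : Nat) : Int) = (e : Int) - K + 1 := by omega
      have hfire : ((e : Nat) : Int) - max ((pvSMin cs (e+1) : Int)) ((e : Int) - K + 1) + 1
          = (K : Int) := by omega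
      rw [if_pos hfire]
      have hwseq : max ((pvSMin cs (e+1) : Int)) ((e : Int) - K + 1)
          = ((e + 1 - K : Nat) : Int) := by omega
      -- the slice A adds
      have hsliceA : PySem.List.slice cs (some (max ((pvSMin cs (e+1) : Int)) ((e : Int) - K + 1)))
            (some (((e : Nat) : Int) + 1))
          = (cs.drop (e + 1 - K)).take K := by
        rw [hwseq, ← hcast, PySem.List.slice_natCast]
        congr 1
        omega
      -- B's range gains the element e-K+1 = ↑(e+1-K)
      have hBsplit : PySem.List.pyRange 0 (((e+1 : Nat) : Int) - K + 1) 1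
          = PySem.List.pyRange 0 ((e : Int) - K + 1) 1 ++ [((e + 1 - K : Nat) : Int)] := by
        have h1 : ((e+1 : Nat) : Int) - K + 1 = ((e : Int) - K + 1) + 1 := by push_cast; ring
        rw [h1, hi]
        exact PySem.List.pyRange_one_succ_right (by omega)
      rw [hBsplit, List.foldl_append, List.foldl_cons, List.foldl_nil]
      -- B's window is the same slice
      have hsliceB : PySem.List.slice cs (some ((e + 1 - K : Nat) : Int))
            (some (((e + 1 - K : Nat) : Int) + K))
          = (cs.drop (e + 1 - K)).take K := by
        have h2 : ((e + 1 - K : Nat) : Int) + K = ((e + 1 : Nat) : Int) := by omega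
        rw [h2, PySem.List.slice_natCast]
        congr 1
        omega
      rw [pvStepB_closed cs (K : Int) _ _ _ hsliceB]
      -- the window is distinct, so B's test succeeds
      have hnodup : ((cs.drop (e + 1 - K)).take K).Nodup := by
        have := pv_nodup_iff cs (e+1) he (e + 1 - K)
        rw [show e + 1 - (e + 1 - K) = K by omega] at this
        exact this.mpr (by omega)
      have hlen : (((PySem.Set.ofList ((cs.drop (e + 1 - K)).take K)).length : Nat) : Int)
          = (K : Int) := by
        rw [PySem.Set.ofList_eq_self_of_nodup _ hnodup, pv_window_len cs _ K (by omega)]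
      rw [if_pos hlen, hsliceA]
      have hW : max ((pvSMin cs (e+1) : Int)) ((e : Int) - K + 1) + 1
          = max ((pvSMin cs (e+1) : Int)) (((e+1 : Nat) : Int) - K + 1) := by
        rw [hcast]
        omega
      rw [hW]
    · -- no distinct window ends here: neither side adds anything
      have hnofire : ¬ (((e : Nat) : Int) - max ((pvSMin cs (e+1) : Int)) ((e : Int) - K + 1) + 1
          = (K : Int)) := by omega
      rw [if_neg hnofire]
      have hBeq : (PySem.List.pyRange 0 (((e+1 : Nat) : Int) - K + 1) 1).foldl
            (pvStepB cs (K : Int)) PySem.Set.empty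
          = (PySem.List.pyRange 0 ((e : Int) - K + 1) 1).foldl (pvStepB cs (K : Int))
            PySem.Set.empty := by
        by_cases hb : 0 ≤ (e : Int) - K + 1
        · have hKe : K ≤ e + 1 := by omega
          have hi : ((e + 1 - K : Nat) : Int) = (e : Int) - K + 1 := by omega
          have hBsplit : PySem.List.pyRange 0 (((e+1 : Nat) : Int) - K + 1) 1
              = PySem.List.pyRange 0 ((e : Int) - K + 1) 1 ++ [((e + 1 - K : Nat) : Int)] := by
            have h1 : ((e+1 : Nat) : Int) - K + 1 = ((e : Int) - K + 1) + 1 := by push_cast; ring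
            rw [h1, hi]
            exact PySem.List.pyRange_one_succ_right (by omega)
          rw [hBsplit, List.foldl_append, List.foldl_cons, List.foldl_nil]
          have hsliceB : PySem.List.slice cs (some ((e + 1 - K : Nat) : Int))
                (some (((e + 1 - K : Nat) : Int) + K))
              = (cs.drop (e + 1 - K)).take K := by
            have h2 : ((e + 1 - K : Nat) : Int) + K = ((e + 1 : Nat) : Int) := by omega
            rw [h2, PySem.List.slice_natCast]
            congr 1
            omega
          rw [pvStepB_closed cs (K : Int) _ _ _ hsliceB]
          have hnotnodup : ¬ ((cs.drop (e + 1 - K)).take K).Nodup := by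
            have := pv_nodup_iff cs (e+1) he (e + 1 - K)
            rw [show e + 1 - (e + 1 - K) = K by omega] at this
            intro hn
            have := this.mp hn
            omega
          have hlt := pv_len_ofList_lt _ hnotnodup
          rw [pv_window_len cs _ K (by omega)] at hlt
          rw [if_neg (by omega)]
        · rw [PySem.List.pyRange_one_eq_nil (by push_cast; omega),
            PySem.List.pyRange_one_eq_nil (by omega)]
      have hW : max ((pvSMin cs (e+1) : Int)) ((e : Int) - K + 1)
          = max ((pvSMin cs (e+1) : Int)) (((e+1 : Nat) : Int) - K + 1) := by
        rw [hcast]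
        omega
      rw [hW, hBeq]

-- k ≤ 0: A never adds anything (the window size windowEnd - window_start + 1 is always ≥ 1)
theorem pv_loopA_neg (cs : List Char) (k : Int) (hk : k ≤ 0) (e : Nat) (he : e ≤ cs.length) :
    ∃ (W : Int) (d : PySem.Dict Char Int),
      (PySem.List.pyRange 0 (e : Int) 1).foldl (pvStepA cs k)
          (PySem.Set.empty, (0 : Int), PySem.Dict.empty)
        = (PySem.Set.empty, W, d)
      ∧ 0 ≤ W ∧ W ≤ (e : Int)
      ∧ ∀ c, d.get? c = (pvLastIdx cs c e).map (fun p => (p : Int)) := by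
  induction e with
  | zero =>
    refine ⟨0, PySem.Dict.empty, ?_, le_refl 0, by simp, ?_⟩
    · rw [PySem.List.pyRange_one_eq_nil (by omega)]
      simp only [List.foldl_nil]
    · intro c
      simp [pvLastIdx, PySem.Dict.get?_empty]
  | succ e ih =>
    obtain ⟨W, d, hfold, hW0, hWe, hd⟩ := ih (by omega)
    have hcast : ((e+1 : Nat) : Int) = (e : Int) + 1 := by push_cast; ring
    have hsplit : PySem.List.pyRange 0 ((e+1 : Nat) : Int) 1
        = PySem.List.pyRange 0 (e : Int) 1 ++ [(e : Int)] := by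
      rw [hcast]
      exact PySem.List.pyRange_one_succ_right (by omega)
    rw [hsplit, List.foldl_append, hfold, List.foldl_cons, List.foldl_nil]
    rw [pvStepA_closed cs k _ _ d ((e : Nat) : Int) (cs.getD e ' ')
      (if d.contains (cs.getD e ' ') then max W (d.getD (cs.getD e ' ') 0 + 1) else W)
      (by simp) rfl]
    have hwsb : 0 ≤ (if d.contains (cs.getD e ' ')
          then max W (d.getD (cs.getD e ' ') 0 + 1) else W)
        ∧ (if d.contains (cs.getD e ' ')
          then max W (d.getD (cs.getD e ' ') 0 + 1) else W) ≤ (e : Int) := by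
      rw [pv_dict_contains cs e d hd]
      cases hL : pvLastIdx cs (cs.getD e ' ') e with
      | none =>
        simp only [Option.isSome_none, Bool.false_eq_true, if_false]
        omega
      | some p =>
        have hp := pvLastIdx_lt cs (cs.getD e ' ') e p hL
        rw [pv_dict_getD cs e d hd _ p hL]
        simp only [Option.isSome_some, if_true]
        omega
    rw [if_neg (by omega)]
    exact ⟨_, d.insert (cs.getD e ' ') ((e : Nat) : Int), rfl, hwsb.1, by omega,
      pv_dict_step cs e d hd⟩

-- ===== VERDICT (by name: the statement is the Claim_ definition above) =====
theorem substrings_with_k_distinct_characters_of_size_k_spec : Claim_equal_substrings_with_k_distinct_characters_of_size_k := by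
  intro sequence k _hdom
  unfold Spec_substrings_with_k_distinct_characters_of_size_k
  unfold substrings_with_k_distinct_characters_of_size_k
  unfold substrings_with_k_distinct_characters_of_size_k_alt
  by_cases hk : 1 ≤ k
  · rw [if_pos hk]
    obtain ⟨K, hKk⟩ : ∃ K : Nat, k = (K : Int) := ⟨k.toNat, (Int.toNat_of_nonneg (by omega)).symm⟩
    subst hKk
    obtain ⟨d, hfold, -⟩ := pv_loopA_inv sequence.toList K (by exact_mod_cast hk)
      sequence.toList.length le_rfl
    rw [hfold]
  · rw [if_neg hk]
    obtain ⟨W, d, hfold, -, -, -⟩ := pv_loopA_neg sequence.toList k (by omega)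
      sequence.toList.length le_rfl
    rw [hfold]
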